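-- pv_equiv track=rewrite | github.com/guige2023/rabai_autoclick | src/workflow_aws_waf.py | _calculate_rule_capacity
-- ===== SOURCE A (Python) =====
-- from typing import Dict, List, Callable, Any, Optional, Set, Union, Type, Awaitable
--
-- def _calculate_rule_capacity(rules: List[Dict[str, Any]]) -> int:
--     """Calculate total capacity required for rules."""
--     capacity = 0
--     for rule in rules:
--         rule_type = rule.get("Type", "REGULAR")
--         if rule_type == "RATE_BASED":
--             capacity += 2
--         elif rule_type == "GROUP":
--             capacity += 1
--         else:
--             capacity += 1
--     return max(capacity, 1)
-- ===== SOURCE B (Python) =====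
-- from typing import Dict, List, Any
--
-- _WEIGHT = {"RATE_BASED": 2, "GROUP": 1}
--
-- def _cap(rules):
--     if not rules:
--         return 0
--     return _WEIGHT.get(rules[0].get("Type", "REGULAR"), 1) + _cap(rules[1:])
--
-- def _calculate_rule_capacity(rules: List[Dict[str, Any]]) -> int:
--     """Calculate total capacity required for rules."""
--     # Every rule's weight is >= 1, so the max(..., 1) floor only matters
--     # for the empty list, which we answer directly.
--     return _cap(rules) if rules else 1
-- ===== Notes on version B (the rewrite author's own statement) =====
-- stated objective: alternative
-- what changed: Replaced the iterative branching accumulator and final max(...,1) with a recursive head+tail sum over a weight table dict, answering the empty list directly (so no max is needed, since every weight is at least 1).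
import Mathlib
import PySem

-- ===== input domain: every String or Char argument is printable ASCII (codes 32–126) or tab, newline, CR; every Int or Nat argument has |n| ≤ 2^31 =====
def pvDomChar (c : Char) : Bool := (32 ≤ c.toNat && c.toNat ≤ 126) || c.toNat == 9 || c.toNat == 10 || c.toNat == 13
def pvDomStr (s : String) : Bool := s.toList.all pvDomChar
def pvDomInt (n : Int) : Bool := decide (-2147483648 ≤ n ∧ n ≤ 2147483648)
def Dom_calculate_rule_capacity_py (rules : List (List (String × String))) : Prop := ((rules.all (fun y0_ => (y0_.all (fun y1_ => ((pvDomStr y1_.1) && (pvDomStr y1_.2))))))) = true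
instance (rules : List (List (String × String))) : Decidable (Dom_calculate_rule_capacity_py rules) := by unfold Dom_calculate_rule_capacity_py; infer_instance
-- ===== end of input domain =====

-- B replaces A's iterative branching accumulator + max(...,1) with a recursive head+tail
-- sum over a weight table, answering the empty list directly (objective: alternative).

-- ===== PORT A =====
-- A: accumulate capacity over rules with per-type branches, then floor at 1.
def calculate_rule_capacity_py (rules : List (List (String × String))) : Int :=
  let capacity := rules.foldl (fun capacity rule =>
    let rule_type := (PySem.Dict.mk rule).getD "Type" "REGULAR"
    if rule_type = "RATE_BASED" then capacity + 2
    else if rule_type = "GROUP" then capacity + 1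
    else capacity + 1) 0
  max capacity 1

-- ===== PORT B =====
-- B: _WEIGHT table; recursive sum of weights; empty list answered directly as 1.
def pvWeightTable : PySem.Dict String Int := PySem.Dict.mk [("RATE_BASED", 2), ("GROUP", 1)]

def pvCap : List (List (String × String)) → Int
  | [] => 0
  | r :: rs => pvWeightTable.getD ((PySem.Dict.mk r).getD "Type" "REGULAR") 1 + pvCap rs

def calculate_rule_capacity_py_alt (rules : List (List (String × String))) : Int :=
  if rules = [] then 1 else pvCap rules

-- ===== PRECONDITION & SPEC =====
def Spec_calculate_rule_capacity_py (rules : List (List (String × String))) (out : Int) : Prop := out = calculate_rule_capacity_py_alt rules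
instance (rules : List (List (String × String))) (out : Int) : Decidable (Spec_calculate_rule_capacity_py rules out) := by unfold Spec_calculate_rule_capacity_py; infer_instance

-- ===== CLAIM (what is proved, stated in full; the proofs are below) =====
def Claim_equal_calculate_rule_capacity_py : Prop := ∀ (rules : List (List (String × String))), Dom_calculate_rule_capacity_py rules → Spec_calculate_rule_capacity_py rules (calculate_rule_capacity_py rules)

-- ===== LEMMAS AND PROOFS =====

-- table lookups, computed once
theorem pv_w_rate : pvWeightTable.getD "RATE_BASED" 1 = 2 := by
  simp only [pvWeightTable, PySem.Dict.getD_eq_get?_getD, PySem.Dict.get?_mk_cons, beq_iff_eq]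
  simp

theorem pv_w_group : pvWeightTable.getD "GROUP" 1 = 1 := by
  simp only [pvWeightTable, PySem.Dict.getD_eq_get?_getD, PySem.Dict.get?_mk_cons, beq_iff_eq]
  rw [if_neg (by decide : ¬("RATE_BASED" = "GROUP"))]
  simp

theorem pv_w_other (t : String) (h1 : t ≠ "RATE_BASED") (h2 : t ≠ "GROUP") :
    pvWeightTable.getD t 1 = 1 := by
  simp only [pvWeightTable, PySem.Dict.getD_eq_get?_getD, PySem.Dict.get?_mk_cons, beq_iff_eq]
  rw [if_neg (Ne.symm h1), if_neg (Ne.symm h2)]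
  rfl

-- A's per-rule branch equals B's table lookup for the same resolved type string
theorem pv_step_eq (t : String) (c : Int) :
    (if t = "RATE_BASED" then c + 2 else if t = "GROUP" then c + 1 else c + 1)
    = c + pvWeightTable.getD t 1 := by
  by_cases h1 : t = "RATE_BASED"
  · subst h1; rw [pv_w_rate, if_pos rfl]
  · by_cases h2 : t = "GROUP"
    · subst h2; rw [pv_w_group, if_neg h1, if_pos rfl]
    · rw [pv_w_other t h1 h2, if_neg h1, if_neg h2]

-- A's fold from c equals c plus B's recursive sum
theorem pv_foldl_eq (rules : List (List (String × String))) (c : Int) :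
    rules.foldl (fun capacity rule =>
      let rule_type := (PySem.Dict.mk rule).getD "Type" "REGULAR"
      if rule_type = "RATE_BASED" then capacity + 2
      else if rule_type = "GROUP" then capacity + 1
      else capacity + 1) c
    = c + pvCap rules := by
  induction rules generalizing c with
  | nil => simp [pvCap]
  | cons r rs ih =>
    rw [List.foldl_cons, ih, pvCap]
    simp only [pv_step_eq]
    ring

-- every weight in the table is >= 1, so pvCap >= length
theorem pv_weight_ge_one (t : String) : 1 ≤ pvWeightTable.getD t 1 := by
  by_cases h1 : t = "RATE_BASED"
  · subst h1; rw [pv_w_rate]; norm_num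
  · by_cases h2 : t = "GROUP"
    · subst h2; rw [pv_w_group]
    · rw [pv_w_other t h1 h2]

theorem pv_cap_ge_len (rules : List (List (String × String))) :
    (rules.length : Int) ≤ pvCap rules := by
  induction rules with
  | nil => simp [pvCap]
  | cons r rs ih =>
    have := pv_weight_ge_one ((PySem.Dict.mk r).getD "Type" "REGULAR")
    simp only [pvCap, List.length_cons]
    push_cast
    omega

-- ===== VERDICT (by name: the statement is the Claim_ definition above) =====
theorem calculate_rule_capacity_py_spec : Claim_equal_calculate_rule_capacity_py := by
  intro rules _
  unfold Spec_calculate_rule_capacity_py calculate_rule_capacity_py calculate_rule_capacity_py_alt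
  simp only [pv_foldl_eq, zero_add]
  cases rules with
  | nil => simp [pvCap]
  | cons r rs =>
    have h := pv_cap_ge_len (r :: rs)
    simp only [List.length_cons] at h
    have : (1 : Int) ≤ pvCap (r :: rs) := by push_cast at h; omega
    simp [max_eq_left this]
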